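-- pv_equiv track=rewrite | github.com/AbhishekPonnaboina/Competitive-Coding-Solutions | Difficulty: Hard/Expression Add Operators/expression-add-operators.py | findExpr
-- ===== SOURCE A (Python) =====
-- def findExpr(num, target):
--     # code here
--     ans = []
--     n = len(num)
--
--     def solve(idx,curr,prev,res):
--         if idx == n:
--             if res == target:
--                 ans.append(curr)
--             return
--         sub = ''
--         currres = 0
--         for i in range(idx,n):
--             if i > idx and num[idx] == '0':
--                 break
--             sub += num[i]
--             currres = currres * 10 + int(num[i])
--
--             if idx == 0:
--                 solve(i+1,sub,currres,currres)
--             else: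
--                 solve(i+1,curr+'+'+sub,currres,res+currres)
--
--                 solve(i+1,curr+'-'+sub,-currres,res-currres)
--
--                 solve(i+1,curr+'*'+sub,prev*currres,res - prev + (prev * currres))
--
--     solve(0,'',0,0)
--     return ans
-- ===== SOURCE B (Python) =====
-- def findExpr(num, target):
--     n = len(num)
--     ans = []
--
--     def intval(s):
--         v = 0
--         for ch in s:
--             v = v * 10 + int(ch)
--         return v
--
--     def evaluate(toks):
--         total = 0
--         term = 0
--         for op, chunk in toks:
--             v = intval(chunk)
--             if op == '*':
--                 term = term * v
--             else:
--                 total += term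
--                 term = v if op == '+' else -v
--         return total + term
--
--     def render(toks):
--         out = ''
--         for op, chunk in toks:
--             out = out + chunk if out == '' else out + op + chunk
--         return out
--
--     def solve(idx, toks):
--         if idx == n:
--             if evaluate(toks) == target:
--                 ans.append(render(toks))
--             return
--         sub = ''
--         for i in range(idx, n):
--             if i > idx and num[idx] == '0':
--                 break
--             sub += num[i]
--             if idx == 0:
--                 solve(i + 1, [('+', sub)])
--             else:
--                 for op in '+-*':
--                     solve(i + 1, toks + [(op, sub)])
--
--     solve(0, [])
--     return ans
-- ===== Notes on version B (the rewrite author's own statement) =====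
-- stated objective: alternative
-- what changed: B keeps the same operand-splitting DFS but drops A's incremental prev/res accumulators (and the prev*currres undo trick): it carries only a list of (operator, chunk) tokens and, at each leaf, evaluates the token list with a single-pass precedence evaluator (manual per-char int parsing) and renders the expression string there.
import Mathlib
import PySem

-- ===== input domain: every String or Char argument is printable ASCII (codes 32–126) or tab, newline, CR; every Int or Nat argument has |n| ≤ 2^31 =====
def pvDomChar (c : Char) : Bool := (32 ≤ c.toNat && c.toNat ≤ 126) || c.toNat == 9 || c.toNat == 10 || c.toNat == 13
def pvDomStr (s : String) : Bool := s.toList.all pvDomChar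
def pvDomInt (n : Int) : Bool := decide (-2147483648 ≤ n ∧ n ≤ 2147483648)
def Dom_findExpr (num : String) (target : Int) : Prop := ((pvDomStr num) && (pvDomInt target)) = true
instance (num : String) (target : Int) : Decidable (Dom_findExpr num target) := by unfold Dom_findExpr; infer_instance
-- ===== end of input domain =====

-- B replaces A's incremental prev/res accumulator recursion by a generate-then-evaluate
-- decomposition (same enumeration order; tokens evaluated by a precedence pass at the leaf);
-- objective: alternative, not faster.

-- ===== PORT A =====
-- int(num[i]) for the single character num[i]; Pre_ excludes the inputs where this is none (ValueError)
def pvIntChar (c : Char) : Int := (PySem.Int.ofChars? [c]).getD 0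

mutual
-- solve(idx, curr, prev, res): `rest` is num[idx:], walked structurally in place of indexing
def solveA (target : Int) (idx : Nat) (rest : List Char) (curr : String) (prev res : Int) : List String :=
  match rest with
  | [] => if res = target then [curr] else []
  | c :: rs => loopA target idx idx (c :: rs) c "" curr prev res 0
  termination_by (rest.length, 1)
-- the `for i in range(idx, n)` loop; `c0` is num[idx], `pending` is num[i:]
def loopA (target : Int) (idx i : Nat) (pending : List Char) (c0 : Char) (sub curr : String)
    (prev res currres : Int) : List String :=
  match pending with
  | [] => []
  | c :: ps =>
    if i > idx ∧ c0 = '0' then []          -- break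
    else
      let sub' := sub.push c
      let currres' := currres * 10 + pvIntChar c
      (if idx = 0 then
        solveA target (i+1) ps sub' currres' currres'
      else
        solveA target (i+1) ps (curr ++ "+" ++ sub') currres' (res + currres')
        ++ solveA target (i+1) ps (curr ++ "-" ++ sub') (-currres') (res - currres')
        ++ solveA target (i+1) ps (curr ++ "*" ++ sub') (prev * currres') (res - prev + prev * currres'))
      ++ loopA target idx (i+1) ps c0 sub' curr prev res currres'
  termination_by (pending.length, 0)
end

def findExpr (num : String) (target : Int) : List String :=
  solveA target 0 num.toList "" 0 0

-- ===== PORT B =====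
-- intval(s): v = v*10 + int(ch) over the characters of s; int(ch) as in pvIntCharB
def pvIntCharB (c : Char) : Int := (PySem.Int.ofChars? [c]).getD 0

def intvalB (s : String) : Int := s.toList.foldl (fun v ch => v * 10 + pvIntCharB ch) 0

-- one step of evaluate's loop, carrying (total, term)
def evalStepB (st : Int × Int) (t : Char × String) : Int × Int :=
  let v := intvalB t.2
  if t.1 = '*' then (st.1, st.2 * v)
  else (st.1 + st.2, if t.1 = '+' then v else -v)

def evaluateB (toks : List (Char × String)) : Int :=
  let st := toks.foldl evalStepB (0, 0)
  st.1 + st.2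

def renderB (toks : List (Char × String)) : String :=
  toks.foldl (fun out t => if out == "" then out ++ t.2 else out ++ String.singleton t.1 ++ t.2) ""

mutual
def solveB (target : Int) (idx : Nat) (rest : List Char) (toks : List (Char × String)) : List String :=
  match rest with
  | [] => if evaluateB toks = target then [renderB toks] else []
  | c :: rs => loopB target idx idx (c :: rs) c "" toks
  termination_by (rest.length, 1)
def loopB (target : Int) (idx i : Nat) (pending : List Char) (c0 : Char) (sub : String)
    (toks : List (Char × String)) : List String :=
  match pending with
  | [] => []
  | c :: ps =>
    if i > idx ∧ c0 = '0' then []          -- break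
    else
      let sub' := sub.push c
      (if idx = 0 then
        solveB target (i+1) ps [('+', sub')]
      else
        ['+', '-', '*'].foldl (fun acc op => acc ++ solveB target (i+1) ps (toks ++ [(op, sub')])) [])
      ++ loopB target idx (i+1) ps c0 sub' toks
  termination_by (pending.length, 0)
end

def findExpr_alt (num : String) (target : Int) : List String :=
  solveB target 0 num.toList []

-- ===== PRECONDITION & SPEC =====
-- A calls int() on every character of num, so it raises ValueError as soon as any character is
-- not an ASCII digit; Pre_ admits exactly the inputs on which A returns (all-digit strings, incl. "").
def Pre_findExpr (num : String) (target : Int) : Prop := num.toList.all Char.isDigit = true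
instance (num : String) (target : Int) : Decidable (Pre_findExpr num target) := by
  unfold Pre_findExpr; infer_instance
def pvWitness_findExpr : String × Int := ("105", 5)

def Spec_findExpr (num : String) (target : Int) (out : List String) : Prop := out = findExpr_alt num target
instance (num : String) (target : Int) (out : List String) : Decidable (Spec_findExpr num target out) := by
  unfold Spec_findExpr; infer_instance

-- ===== CLAIM (what is proved, stated in full; the proofs are below) =====
def Claim_equal_findExpr : Prop := ∀ (num : String) (target : Int), Dom_findExpr num target → Pre_findExpr num target → Spec_findExpr num target (findExpr num target)

-- ===== LEMMAS AND PROOFS =====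

theorem intvalB_push (s : String) (c : Char) :
    intvalB (s.push c) = intvalB s * 10 + pvIntCharB c := by
  simp [intvalB, String.toList_push]

theorem push_ne_empty (s : String) (c : Char) : s.push c ≠ "" := by
  intro h
  have := congrArg String.toList h
  simp at this

theorem renderB_append (toks : List (Char × String)) (op : Char) (s : String)
    (h : renderB toks ≠ "") :
    renderB (toks ++ [(op, s)]) = renderB toks ++ String.singleton op ++ s := by
  simp only [renderB, List.foldl_append, List.foldl]
  rw [if_neg]
  simpa [renderB] using h

theorem renderB_single (op : Char) (s : String) : renderB [(op, s)] = s := by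
  simp [renderB]

theorem evalStB_append (toks : List (Char × String)) (t : Char × String) :
    (toks ++ [t]).foldl evalStepB (0, 0) = evalStepB (toks.foldl evalStepB (0, 0)) t := by
  simp [List.foldl_append]

-- the combined loop/solve statements, proved by induction on a length bound
def LoopStmt (N : Nat) : Prop :=
  ∀ (target : Int) (idx i : Nat) (pending : List Char) (c0 : Char) (sub curr : String)
    (prev res currres : Int) (toks : List (Char × String)),
    pending.length ≤ N →
    curr = renderB toks →
    res = evaluateB toks →
    prev = (toks.foldl evalStepB (0, 0)).2 →
    currres = intvalB sub →
    (idx = 0 → toks = []) →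
    (idx ≠ 0 → renderB toks ≠ "") →
    loopA target idx i pending c0 sub curr prev res currres = loopB target idx i pending c0 sub toks

def SolveStmt (N : Nat) : Prop :=
  ∀ (target : Int) (idx : Nat) (rest : List Char) (curr : String) (prev res : Int)
    (toks : List (Char × String)),
    rest.length ≤ N →
    curr = renderB toks →
    res = evaluateB toks →
    prev = (toks.foldl evalStepB (0, 0)).2 →
    (idx = 0 → toks = []) →
    (idx ≠ 0 → renderB toks ≠ "") →
    solveA target idx rest curr prev res = solveB target idx rest toks

theorem solve_of_loop (N : Nat) (hl : LoopStmt N) : SolveStmt N := by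
  intro target idx rest curr prev res toks hN hcur hres hprev h0 hne
  match rest with
  | [] =>
    rw [solveA, solveB, hcur, hres]
  | c :: rs =>
    rw [solveA, solveB]
    exact hl target idx idx (c :: rs) c "" curr prev res 0 toks hN hcur hres hprev
      (by simp [intvalB]) h0 hne

theorem key_induction (N : Nat) : LoopStmt N ∧ SolveStmt N := by
  induction N with
  | zero =>
    constructor
    · intro target idx i pending c0 sub curr prev res currres toks hN _ _ _ _ _ _
      match pending with
      | [] => rw [loopA, loopB]
      | c :: ps => simp at hN
    · exact solve_of_loop 0 (by
        intro target idx i pending c0 sub curr prev res currres toks hN _ _ _ _ _ _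
        match pending with
        | [] => rw [loopA, loopB]
        | c :: ps => simp at hN)
  | succ N ih =>
    have hloop : LoopStmt (N + 1) := by
      intro target idx i pending c0 sub curr prev res currres toks hN hcur hres hprev hsub h0 hne
      match pending with
      | [] => rw [loopA, loopB]
      | c :: ps =>
        rw [loopA, loopB]
        by_cases hbr : i > idx ∧ c0 = '0'
        · rw [if_pos hbr, if_pos hbr]
        · rw [if_neg hbr, if_neg hbr]
          have hlen : ps.length ≤ N := by simpa using hN
          have hsub' : intvalB (sub.push c) = currres * 10 + pvIntChar c := by
            rw [intvalB_push, hsub]; rfl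
          have hS : SolveStmt N := (ih).2
          have hL : LoopStmt N := (ih).1
          have htail : loopA target idx (i+1) ps c0 (sub.push c) curr prev res
              (currres * 10 + pvIntChar c) = loopB target idx (i+1) ps c0 (sub.push c) toks := by
            exact hL target idx (i+1) ps c0 (sub.push c) curr prev res _ toks hlen
              hcur hres hprev hsub'.symm h0 hne
          by_cases hidx : idx = 0
          · simp only [if_pos hidx]
            have htoks : toks = [] := h0 hidx
            subst htoks
            have hhead : solveA target (i+1) ps (sub.push c) (currres * 10 + pvIntChar c)
                (currres * 10 + pvIntChar c) = solveB target (i+1) ps [('+', sub.push c)] := by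
              apply hS target (i+1) ps _ _ _ _ hlen
              · rw [renderB_single]
              · simp [evaluateB, List.foldl, evalStepB, hsub'.symm]
              · simp [List.foldl, evalStepB, hsub'.symm]
              · intro h; omega
              · intro _; rw [renderB_single]; exact push_ne_empty _ _
            rw [hhead, htail]
          · simp only [if_neg hidx]
            have hrne : renderB toks ≠ "" := hne hidx
            have hst : ∀ op : Char,
                (toks ++ [(op, sub.push c)]).foldl evalStepB (0, 0)
                  = evalStepB (toks.foldl evalStepB (0, 0)) (op, sub.push c) :=
              fun op => evalStB_append toks (op, sub.push c)
            have hrend : ∀ op : Char,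
                renderB (toks ++ [(op, sub.push c)]) = curr ++ String.singleton op ++ sub.push c := by
              intro op; rw [renderB_append toks op _ hrne, hcur]
            have hplus : solveA target (i+1) ps (curr ++ "+" ++ sub.push c)
                (currres * 10 + pvIntChar c) (res + (currres * 10 + pvIntChar c))
                = solveB target (i+1) ps (toks ++ [('+', sub.push c)]) := by
              apply hS target (i+1) ps _ _ _ _ hlen
              · rw [hrend '+']; rfl
              · simp [evaluateB, hst '+', evalStepB, hsub'.symm, hres];
                try ring
              · simp [hst '+', evalStepB, hsub'.symm]
              · intro h; omega
              · intro _
                rw [renderB_append toks '+' _ hrne]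
                intro h
                have := congrArg String.toList h
                simp [String.toList_push] at this
            have hminus : solveA target (i+1) ps (curr ++ "-" ++ sub.push c)
                (-(currres * 10 + pvIntChar c)) (res - (currres * 10 + pvIntChar c))
                = solveB target (i+1) ps (toks ++ [('-', sub.push c)]) := by
              apply hS target (i+1) ps _ _ _ _ hlen
              · rw [hrend '-']; rfl
              · simp [evaluateB, hst '-', evalStepB, hsub'.symm, hres];
                try ring
              · simp [hst '-', evalStepB, hsub'.symm]
              · intro h; omega
              · intro _
                rw [renderB_append toks '-' _ hrne]
                intro h
                have := congrArg String.toList h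
                simp [String.toList_push] at this
            have hmul : solveA target (i+1) ps (curr ++ "*" ++ sub.push c)
                (prev * (currres * 10 + pvIntChar c)) (res - prev + prev * (currres * 10 + pvIntChar c))
                = solveB target (i+1) ps (toks ++ [('*', sub.push c)]) := by
              apply hS target (i+1) ps _ _ _ _ hlen
              · rw [hrend '*']; rfl
              · simp [evaluateB, hst '*', evalStepB, hsub'.symm, hres, hprev];
                try ring
              · simp [hst '*', evalStepB, hsub'.symm, hprev]
              · intro h; omega
              · intro _
                rw [renderB_append toks '*' _ hrne]
                intro h
                have := congrArg String.toList h
                simp [String.toList_push] at this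
            simp only [List.foldl, List.nil_append]
            rw [hplus, hminus, hmul, htail, List.append_assoc]
    exact ⟨hloop, solve_of_loop (N + 1) hloop⟩

-- ===== VERDICT (by name: the statement is the Claim_ definition above) =====
theorem findExpr_spec : Claim_equal_findExpr := by
  intro num target _hdom hpre
  unfold Spec_findExpr findExpr findExpr_alt
  exact (key_induction num.toList.length).2 target 0 num.toList "" 0 0 []
    le_rfl rfl rfl rfl (fun _ => rfl) (fun h => absurd rfl h)
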